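-- pv_equiv track=rewrite | github.com/ngvgi/algos | Problem attempts/BankTrans.py | solution
-- ===== SOURCE A (Python) =====
-- def solution(transactions, dates):
--     months = [int(date[5:7]) for date in dates]
--     deductible_months = 12
--     hash = dict()
--
--     for month in range(len(months)):
--         if transactions[month] < 0:
--             hash[months[month]] = hash.get(months[month], 0) + abs(
--                 transactions[month])
--
--     deductible_months -= sum(value >= 100 for value in hash.values())
--
--     balance = sum(transactions) - (deductible_months * 5)
--     return balance
-- ===== SOURCE B (Python) =====
-- def solution(transactions, dates):
--     months = [int(date[5:7]) for date in dates]
--     neg = [(m, -t) for m, t in zip(months, transactions) if t < 0]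
--     seen = []
--     for m, _ in neg:
--         if m not in seen:
--             seen.append(m)
--     waived = 0
--     for m in seen:
--         if sum(a for mm, a in neg if mm == m) >= 100:
--             waived += 1
--     return sum(transactions) - (12 - waived) * 5
-- ===== Notes on version B (the rewrite author's own statement) =====
-- stated objective: alternative
-- what changed: A builds a month->total dict in one index-driven accumulation pass and counts its values; B never builds a dict: it collects the distinct months of negative transactions and re-scans the negative transactions once per such month to total it (month-outer rescan).
import Mathlib
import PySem

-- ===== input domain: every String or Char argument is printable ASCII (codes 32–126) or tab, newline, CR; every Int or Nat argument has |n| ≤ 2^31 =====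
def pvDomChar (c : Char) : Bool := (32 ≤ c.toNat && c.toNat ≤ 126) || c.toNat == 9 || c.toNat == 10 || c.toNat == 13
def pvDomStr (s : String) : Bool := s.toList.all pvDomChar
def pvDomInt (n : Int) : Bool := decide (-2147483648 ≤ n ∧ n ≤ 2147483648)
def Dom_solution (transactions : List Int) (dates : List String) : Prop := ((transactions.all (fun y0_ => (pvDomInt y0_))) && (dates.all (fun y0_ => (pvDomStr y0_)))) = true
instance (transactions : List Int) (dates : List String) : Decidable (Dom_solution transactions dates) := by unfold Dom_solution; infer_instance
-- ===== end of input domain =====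

-- B replaces A's single index-driven dict-accumulation pass by a month-outer rescan:
-- collect the distinct months with negative transactions, then re-scan the negative
-- transactions once per such month to total it (objective: alternative decomposition, not faster).

-- ===== PORT A =====
def solution (transactions : List Int) (dates : List String) : Int :=
  -- int(date[5:7]): Pre_solution guarantees the parse succeeds, so `.getD 0` is never taken
  let months : List Int :=
    dates.map (fun date => (PySem.Int.ofStr? (PySem.Str.slice date (some 5) (some 7))).getD 0)
  let h : PySem.Dict Int Int :=
    (PySem.List.pyRange 0 (months.length : Int) 1).foldl
      (fun d month =>
        if PySem.List.pyGetD transactions month 0 < 0 then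
          d.insert (PySem.List.pyGetD months month 0)
            (d.getD (PySem.List.pyGetD months month 0) 0 + |PySem.List.pyGetD transactions month 0|)
        else d)
      PySem.Dict.empty
  let deductible : Int := 12 - (h.values.map (fun v => if 100 ≤ v then (1 : Int) else 0)).sum
  transactions.sum - deductible * 5

-- ===== PORT B =====
def solution_alt (transactions : List Int) (dates : List String) : Int :=
  let months : List Int :=
    dates.map (fun date => (PySem.Int.ofStr? (PySem.Str.slice date (some 5) (some 7))).getD 0)
  let neg : List (Int × Int) :=
    ((months.zip transactions).filter (fun p => p.2 < 0)).map (fun p => (p.1, -p.2))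
  let seen : PySem.Set Int := neg.foldl (fun s p => PySem.Set.add s p.1) PySem.Set.empty
  let waived : Int :=
    seen.foldl
      (fun w m => if 100 ≤ ((neg.filter (fun q => q.1 == m)).map (fun q => q.2)).sum then w + 1 else w) 0
  transactions.sum - (12 - waived) * 5

-- ===== PRECONDITION & SPEC =====
-- Pre_ excludes exactly the inputs where Python A raises: a date whose [5:7] slice is not a
-- valid int literal (ValueError in the months comprehension), or fewer transactions than
-- dates (IndexError at transactions[month]).
def Pre_solution (transactions : List Int) (dates : List String) : Prop :=
  dates.length ≤ transactions.length ∧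
  ∀ date ∈ dates, (PySem.Int.ofStr? (PySem.Str.slice date (some 5) (some 7))).isSome = true
instance (transactions : List Int) (dates : List String) : Decidable (Pre_solution transactions dates) := by unfold Pre_solution; infer_instance

def pvWitness_solution : List Int × List String := ([-150, 50], ["2020-01-01", "2020-01-02"])

def Spec_solution (transactions : List Int) (dates : List String) (out : Int) : Prop := out = solution_alt transactions dates
instance (transactions : List Int) (dates : List String) (out : Int) : Decidable (Spec_solution transactions dates out) := by unfold Spec_solution; infer_instance

-- ===== CLAIM (what is proved, stated in full; the proofs are below) =====
def Claim_equal_solution : Prop := ∀ (transactions : List Int) (dates : List String), Dom_solution transactions dates → Pre_solution transactions dates → Spec_solution transactions dates (solution transactions dates)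

-- ===== LEMMAS AND PROOFS =====

-- the months list both ports compute
def pvMonths (dates : List String) : List Int :=
  dates.map (fun date => (PySem.Int.ofStr? (PySem.Str.slice date (some 5) (some 7))).getD 0)

-- A's accumulation step over (month, transaction) pairs
def pvStep (d : PySem.Dict Int Int) (p : Int × Int) : PySem.Dict Int Int :=
  if p.2 < 0 then d.insert p.1 (d.getD p.1 0 + |p.2|) else d

-- index loop = zip loop (generic accumulator)
lemma pv_idxloop {β : Type} (f : β → Int → Int → β) :
    ∀ (ms ts : List Int) (d : β), ms.length ≤ ts.length →
      (List.range ms.length).foldl (fun d k => f d (ms.getD k 0) (ts.getD k 0)) d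
        = (ms.zip ts).foldl (fun d p => f d p.1 p.2) d := by
  intro ms
  induction ms with
  | nil => simp
  | cons m ms ih =>
    intro ts d h
    cases ts with
    | nil => simp at h
    | cons t ts =>
      simp only [List.length_cons, List.range_succ_eq_map, List.foldl_cons, List.foldl_map,
        List.getD_cons_zero, List.zip_cons_cons]
      have := ih ts (f d m t) (by simpa using h)
      simpa [List.getD_cons_succ] using this

lemma pv_keys_insert_add (d : PySem.Dict Int Int) (k v : Int) :
    (d.insert k v).keys = PySem.Set.add d.keys k := by
  by_cases h : d.contains k = true
  · rw [PySem.Dict.keys_insert_of_contains d v h,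
      PySem.Set.add_of_mem ((PySem.Dict.contains_iff_mem_keys d k).mp h)]
  · have h' : d.contains k = false := by simpa using h
    rw [PySem.Dict.keys_insert_of_not_contains d v h',
      PySem.Set.add_of_not_mem (fun hm => h ((PySem.Dict.contains_iff_mem_keys d k).mpr hm))]

lemma pv_keys_loop : ∀ (l : List (Int × Int)) (d : PySem.Dict Int Int),
    (l.foldl pvStep d).keys = PySem.Set.update d.keys ((l.filter (fun p => p.2 < 0)).map (·.1)) := by
  intro l
  induction l with
  | nil => simp [PySem.Set.update_nil]
  | cons p l ih =>
    intro d
    by_cases hp : p.2 < 0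
    · have hf : List.filter (fun p => decide (p.2 < 0)) (p :: l)
          = p :: List.filter (fun p => decide (p.2 < 0)) l := by simp [hp]
      rw [List.foldl_cons, hf]
      simp only [pvStep, if_pos hp, List.map_cons, PySem.Set.update_cons, ih, pv_keys_insert_add]
    · have hf : List.filter (fun p => decide (p.2 < 0)) (p :: l)
          = List.filter (fun p => decide (p.2 < 0)) l := by simp [hp]
      rw [List.foldl_cons, hf]
      simp only [pvStep, if_neg hp, ih]

lemma pv_getD_loop : ∀ (l : List (Int × Int)) (d : PySem.Dict Int Int) (m : Int),
    (l.foldl pvStep d).getD m 0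
      = d.getD m 0 + ((l.filter (fun p => p.1 == m && decide (p.2 < 0))).map (fun p => |p.2|)).sum := by
  intro l
  induction l with
  | nil => simp
  | cons p l ih =>
    intro d m
    by_cases hp : p.2 < 0
    · by_cases hm : p.1 = m
      · rw [List.foldl_cons, List.filter_cons_of_pos (by simp [hm, hp])]
        simp only [pvStep, if_pos hp, ih, PySem.Dict.getD_insert, hm, reduceIte, List.map_cons,
          List.sum_cons]
        ring
      · rw [List.foldl_cons, List.filter_cons_of_neg (by simp [hm])]
        simp only [pvStep, if_pos hp, ih, PySem.Dict.getD_insert]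
        rw [if_neg (fun h => hm h.symm)]
    · rw [List.foldl_cons, List.filter_cons_of_neg (by simp [hp])]
      simp only [pvStep, if_neg hp, ih]

lemma pv_nodup_loop (l : List (Int × Int)) :
    (l.foldl pvStep PySem.Dict.empty).keys.Nodup := by
  rw [pv_keys_loop]
  exact PySem.Set.nodup_update _ _ (by simp [PySem.Dict.keys_empty])

-- shared characterisation of both ports
def pvNegPairs (transactions : List Int) (dates : List String) : List (Int × Int) :=
  ((pvMonths dates).zip transactions).filter (fun p => p.2 < 0)

def pvGroupSum (transactions : List Int) (dates : List String) (m : Int) : Int :=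
  (((pvNegPairs transactions dates).filter (fun p => p.1 == m)).map (fun p => |p.2|)).sum

def pvCount (transactions : List Int) (dates : List String) : Nat :=
  List.countP (fun m => decide (100 ≤ pvGroupSum transactions dates m))
    (PySem.Set.ofList ((pvNegPairs transactions dates).map (·.1)))

lemma pv_A_char (transactions : List Int) (dates : List String)
    (hlen : dates.length ≤ transactions.length) :
    solution transactions dates
      = transactions.sum - (12 - (pvCount transactions dates : Int)) * 5 := by
  have hA : solution transactions dates
      = transactions.sum - (12 -
          ((((PySem.List.pyRange 0 ((pvMonths dates).length : Int) 1).foldl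
            (fun d month =>
              if PySem.List.pyGetD transactions month 0 < 0 then
                d.insert (PySem.List.pyGetD (pvMonths dates) month 0)
                  (d.getD (PySem.List.pyGetD (pvMonths dates) month 0) 0
                    + |PySem.List.pyGetD transactions month 0|)
              else d)
            PySem.Dict.empty).values.map (fun v => if 100 ≤ v then (1 : Int) else 0)).sum)) * 5 := rfl
  rw [hA, PySem.List.pyRange_zero_nat (pvMonths dates).length, List.foldl_map]
  simp only [PySem.List.pyGetD_natCast]
  have hlen' : (pvMonths dates).length ≤ transactions.length := by
    simpa [pvMonths] using hlen
  rw [pv_idxloop (fun d mv tv => if tv < 0 then d.insert mv (d.getD mv 0 + |tv|) else d)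
      (pvMonths dates) transactions PySem.Dict.empty hlen']
  have hfold : ((pvMonths dates).zip transactions).foldl
      (fun d p => if p.2 < 0 then d.insert p.1 (d.getD p.1 0 + |p.2|) else d) PySem.Dict.empty
      = ((pvMonths dates).zip transactions).foldl pvStep PySem.Dict.empty := rfl
  rw [hfold]
  set H := ((pvMonths dates).zip transactions).foldl pvStep PySem.Dict.empty with hH
  have hv : H.values = H.keys.map (fun k => H.getD k 0) :=
    PySem.Dict.values_eq_map_keys H (by rw [hH]; exact pv_nodup_loop _) 0
  have hk : H.keys = PySem.Set.ofList ((pvNegPairs transactions dates).map (·.1)) := by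
    rw [hH, pv_keys_loop, PySem.Dict.keys_empty]
    exact PySem.Set.update_empty _
  have hg : ∀ m, H.getD m 0 = pvGroupSum transactions dates m := by
    intro m
    rw [hH, pv_getD_loop]
    simp [pvGroupSum, pvNegPairs, PySem.Dict.getD_empty, List.filter_filter]
  rw [hv, hk, List.map_map]
  have hc : ((PySem.Set.ofList ((pvNegPairs transactions dates).map (·.1))).map
      ((fun v => if 100 ≤ v then (1 : Int) else 0) ∘ fun k => H.getD k 0)).sum
      = (pvCount transactions dates : Int) := by
    have heq : ((fun v => if 100 ≤ v then (1 : Int) else 0) ∘ fun k => H.getD k 0)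
        = fun k => if (decide (100 ≤ pvGroupSum transactions dates k)) = true then (1 : Int) else 0 := by
      funext k; simp [Function.comp, hg k]
    rw [heq, PySem.List.sum_map_ite_one_zero]
    rfl
  rw [hc]

lemma pv_B_char (transactions : List Int) (dates : List String) :
    solution_alt transactions dates
      = transactions.sum - (12 - (pvCount transactions dates : Int)) * 5 := by
  set neg : List (Int × Int) :=
    (((pvMonths dates).zip transactions).filter (fun p => p.2 < 0)).map (fun p => (p.1, -p.2))
    with hneg
  set seen : PySem.Set Int := neg.foldl (fun s p => PySem.Set.add s p.1) PySem.Set.empty with hseen0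
  have hB : solution_alt transactions dates
      = transactions.sum - (12 - seen.foldl
          (fun w m =>
            if 100 ≤ ((neg.filter (fun q => q.1 == m)).map (fun q => q.2)).sum then w + 1 else w)
          0) * 5 := rfl
  rw [hB]
  have hseen : seen = PySem.Set.ofList ((pvNegPairs transactions dates).map (·.1)) := by
    rw [hseen0, ← PySem.Set.update_map_eq_foldl_add neg (·.1) PySem.Set.empty,
      PySem.Set.update_empty, hneg, List.map_map]
    rfl
  have hsum : ∀ m : Int,
      ((neg.filter (fun q => q.1 == m)).map (fun q => q.2)).sum = pvGroupSum transactions dates m := by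
    intro m
    rw [hneg, List.filter_map, List.map_map]
    have hcomp : ((fun (q : Int × Int) => q.1 == m) ∘ fun p => (p.1, -p.2))
        = fun (p : Int × Int) => p.1 == m := rfl
    rw [hcomp]
    unfold pvGroupSum pvNegPairs
    rw [List.filter_filter]
    congr 1
    apply List.map_congr_left
    intro p hp
    have hneg2 : p.2 < 0 := by
      have := List.of_mem_filter hp
      simpa using (Bool.and_elim_right this)
    simp [abs_of_neg hneg2]
  have hshape : (fun (w : Int) (m : Int) =>
      if 100 ≤ ((neg.filter (fun q => q.1 == m)).map (fun q => q.2)).sum then w + 1 else w)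
      = fun w m => if (decide (100 ≤ pvGroupSum transactions dates m)) = true then w + 1 else w := by
    funext w m; simp [hsum m]
  rw [hseen, hshape, PySem.List.foldl_count_if]
  simp [pvCount]

-- ===== VERDICT (by name: the statement is the Claim_ definition above) =====
theorem solution_spec : Claim_equal_solution := by
  intro transactions dates _ hpre
  unfold Spec_solution
  rw [pv_A_char transactions dates hpre.1, pv_B_char]
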